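-- pv_equiv track=rewrite | github.com/kildegaard/fcen | python-UNSAM-2020/correciones_pares/grabarComentarios/grabarComentarios.py | esComentarioMedio
-- ===== SOURCE A (Python) =====
-- def esComentarioMedio(linea):
--     """
--     Función que detecta comentarios en el medio de una línea.
--
--     Args:
--         linea (string): línea extraída del código para analizar.
--
--     Returns:
--         boolean: es o no un comentario!
--     """
--     res_bool = False
--     res_nletra = 0
--     for nletra, letra in enumerate(linea):
--         # continue
--         if letra == '#':
--             res_bool = True
--             res_nletra = nletra
--     resultado = (res_nletra, res_bool)
--     return resultado
-- ===== SOURCE B (Python) =====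
-- def esComentarioMedio(linea):
--     for i in range(len(linea) - 1, -1, -1):
--         if linea[i] == '#':
--             return (i, True)
--     return (0, False)
-- ===== Notes on version B (the rewrite author's own statement) =====
-- stated objective: alternative
-- what changed: B scans the line from the right and returns at the first '#' it meets, instead of A's full forward pass maintaining a running last-seen accumulator.
import Mathlib
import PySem

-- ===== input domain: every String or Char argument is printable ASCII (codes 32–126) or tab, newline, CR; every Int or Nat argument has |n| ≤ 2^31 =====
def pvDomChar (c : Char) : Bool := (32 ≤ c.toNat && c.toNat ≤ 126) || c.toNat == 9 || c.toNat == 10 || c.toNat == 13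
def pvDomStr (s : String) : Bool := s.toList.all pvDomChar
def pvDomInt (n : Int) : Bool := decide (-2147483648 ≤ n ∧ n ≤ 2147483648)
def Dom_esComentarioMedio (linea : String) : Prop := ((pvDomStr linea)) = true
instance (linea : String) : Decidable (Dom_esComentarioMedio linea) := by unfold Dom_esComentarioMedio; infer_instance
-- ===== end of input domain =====

-- B replaces A's full forward pass with a last-seen accumulator by a right-to-left scan that returns at the first '#'; same result, alternative decomposition.

-- ===== PORT A =====
-- forward pass: for nletra, letra in enumerate(linea): if letra == '#': res_bool, res_nletra := True, nletra
def esComentarioMedio (linea : String) : Int × Bool :=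
  let st := (PySem.List.enumerate linea.toList 0).foldl
      (fun (st : Int × Bool) (p : Int × Char) =>
        if p.2 = '#' then (p.1, true) else st)
      (0, false)
  (st.1, st.2)

-- ===== PORT B =====
-- reverse scan with early return: walk the reversed character list, counting the index down
def pvAltScan : List Char → Int → Int × Bool
  | [], _ => (0, false)
  | c :: rest, i => if c = '#' then (i, true) else pvAltScan rest (i - 1)

def esComentarioMedio_alt (linea : String) : Int × Bool :=
  pvAltScan linea.toList.reverse ((linea.toList.length : Int) - 1)

-- ===== PRECONDITION & SPEC =====
def Spec_esComentarioMedio (linea : String) (out : Int × Bool) : Prop := out = esComentarioMedio_alt linea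
instance (linea : String) (out : Int × Bool) : Decidable (Spec_esComentarioMedio linea out) := by unfold Spec_esComentarioMedio; infer_instance

-- ===== CLAIM (what is proved, stated in full; the proofs are below) =====
def Claim_equal_esComentarioMedio : Prop := ∀ (linea : String), Dom_esComentarioMedio linea → Spec_esComentarioMedio linea (esComentarioMedio linea)

-- ===== LEMMAS AND PROOFS =====
theorem pv_fold_eq_scan (l : List Char) :
    (PySem.List.enumerate l 0).foldl
      (fun (st : Int × Bool) (p : Int × Char) =>
        if p.2 = '#' then (p.1, true) else st)
      (0, false)
    = pvAltScan l.reverse ((l.length : Int) - 1) := by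
  induction l using List.reverseRecOn with
  | nil => simp [PySem.List.enumerate, pvAltScan]
  | append_singleton xs c ih =>
    rw [PySem.List.enumerate_append]
    simp only [List.foldl_append, List.reverse_append, List.reverse_cons,
      List.reverse_nil, List.nil_append, List.cons_append, List.length_append,
      List.length_cons, List.length_nil, PySem.List.enumerate,
      List.foldl_cons, List.foldl_nil, pvAltScan]
    by_cases hc : c = '#'
    · simp [hc]
    · simp only [hc, if_false, ih]
      congr 1
      push_cast
      ring

theorem esComentarioMedio_spec : Claim_equal_esComentarioMedio := by
  intro linea _
  unfold Spec_esComentarioMedio esComentarioMedio esComentarioMedio_alt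
  simpa using pv_fold_eq_scan linea.toList
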